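-- pv_equiv track=rewrite | github.com/AuReMe/metage2metabo | metage2metabo/m2m_analysis.py | detect_taxon_species
-- ===== SOURCE A (Python) =====
-- def detect_taxon_species(taxon_named_species, all_taxons):
--     """From a list of species named after their taxon, return a dictionary of {taxon: [species_1, species_2]}
--
--     Args:
--         taxon_named_species (dict): {species_ID: species_named_after_taxon}
--         all_taxons (list): all taxon in the dataset
--
--     Returns:
--         dict: {taxon: [species_1, species_2]}
--     """
--     taxon_species = {}
--     for species_id in taxon_named_species:
--         taxon = species_id.split('__')[0]
--         if taxon not in taxon_species:
--             taxon_species[taxon] = [taxon_named_species[species_id]]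
--         else:
--             taxon_species[taxon].append(taxon_named_species[species_id])
--
--     for taxon in all_taxons:
--         if taxon not in taxon_species:
--             taxon_species[taxon] = []
--
--     return taxon_species
-- ===== SOURCE B (Python) =====
-- def detect_taxon_species(taxon_named_species, all_taxons):
--     """From a list of species named after their taxon, return a dictionary of {taxon: [species_1, species_2]}"""
--     # Pass 1: the taxons in first-occurrence order (species-derived first, then all_taxons).
--     seen = set()
--     order = []
--     for species_id in taxon_named_species:
--         taxon = species_id.split('__')[0]
--         if taxon not in seen:
--             seen.add(taxon)
--             order.append(taxon)
--     for taxon in all_taxons: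
--         if taxon not in seen:
--             seen.add(taxon)
--             order.append(taxon)
--     # Pass 2: gather each taxon's species by filtering the items once per taxon.
--     return {taxon: [value for species_id, value in taxon_named_species.items()
--                     if species_id.split('__')[0] == taxon]
--             for taxon in order}
-- ===== Notes on version B (the rewrite author's own statement) =====
-- stated objective: alternative
-- what changed: Replaced the single-pass dict-of-lists insertion/append with two phases: first compute the taxon key order (first occurrence, then missing all_taxons), then build each group by a per-taxon filter comprehension over the items.
import Mathlib
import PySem

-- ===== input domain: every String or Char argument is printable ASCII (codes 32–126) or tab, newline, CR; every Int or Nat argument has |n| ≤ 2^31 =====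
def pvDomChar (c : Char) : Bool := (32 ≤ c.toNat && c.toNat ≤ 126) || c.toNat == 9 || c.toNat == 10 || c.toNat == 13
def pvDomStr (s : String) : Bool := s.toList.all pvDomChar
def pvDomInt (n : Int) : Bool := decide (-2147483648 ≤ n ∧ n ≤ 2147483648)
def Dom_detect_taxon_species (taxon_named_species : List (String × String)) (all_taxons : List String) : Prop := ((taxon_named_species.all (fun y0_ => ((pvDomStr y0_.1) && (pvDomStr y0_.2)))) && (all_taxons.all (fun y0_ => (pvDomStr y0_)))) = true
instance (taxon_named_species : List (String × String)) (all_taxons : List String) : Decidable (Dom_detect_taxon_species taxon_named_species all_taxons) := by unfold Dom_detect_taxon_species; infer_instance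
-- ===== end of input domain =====

-- B computes the taxon key order first and then builds each group by a per-taxon filter of the
-- items, instead of A's single-pass dict-of-lists insertion/append ('alternative' objective).

-- species_id.split('__')[0]; a split with a non-empty separator never returns [], so [0] never raises
def pvTaxonOf (s : String) : String := (PySem.List.pyGet? ((PySem.Str.split? s "__").getD []) 0).getD ""

-- ===== PORT A =====
def detect_taxon_species (taxon_named_species : List (String × String)) (all_taxons : List String) : List (String × List String) :=
  -- taxon_species = {}; for species_id in taxon_named_species: …
  let d1 : PySem.Dict String (List String) :=
    taxon_named_species.foldl (fun d kv =>
      let taxon := pvTaxonOf kv.1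
      -- taxon_named_species[species_id]: the key comes from iterating the dict, so it is present
      let v := (PySem.Dict.mk taxon_named_species).getD kv.1 ""
      if d.contains taxon = false then d.insert taxon [v]
      else d.insert taxon (d.getD taxon [] ++ [v])) PySem.Dict.empty
  -- for taxon in all_taxons: if taxon not in taxon_species: taxon_species[taxon] = []
  let d2 := all_taxons.foldl (fun d t => if d.contains t = false then d.insert t [] else d) d1
  d2.items

-- ===== PORT B =====
def detect_taxon_species_alt (taxon_named_species : List (String × String)) (all_taxons : List String) : List (String × List String) :=
  -- pass 1: seen = set(); order = []; two append-only accumulators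
  let step := fun (st : PySem.Set String × List String) (t : String) =>
    if PySem.Set.contains st.1 t then st else (PySem.Set.add st.1 t, st.2 ++ [t])
  let st1 := taxon_named_species.foldl (fun st kv => step st (pvTaxonOf kv.1)) (PySem.Set.empty, [])
  let st2 := all_taxons.foldl step st1
  -- pass 2: {taxon: [value for species_id, value in items if species_id.split('__')[0] == taxon] for taxon in order}
  st2.2.map (fun t =>
    (t, (taxon_named_species.filter (fun kv => pvTaxonOf kv.1 == t)).map Prod.snd))

-- ===== PRECONDITION & SPEC =====
-- Pre_ excludes association lists with duplicate species ids: a Python dict cannot contain a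
-- duplicate key, so such lists correspond to no input of the original function.
def Pre_detect_taxon_species (taxon_named_species : List (String × String)) (all_taxons : List String) : Prop :=
  (taxon_named_species.map Prod.fst).Nodup
instance (taxon_named_species : List (String × String)) (all_taxons : List String) : Decidable (Pre_detect_taxon_species taxon_named_species all_taxons) := by unfold Pre_detect_taxon_species; infer_instance
def pvWitness_detect_taxon_species : (List (String × String)) × List String :=
  ([("a__s1", "gen1"), ("a__s2", "gen2"), ("b__s3", "gen3")], ["a", "c"])
def Spec_detect_taxon_species (taxon_named_species : List (String × String)) (all_taxons : List String) (out : List (String × List String)) : Prop := out = detect_taxon_species_alt taxon_named_species all_taxons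
instance (taxon_named_species : List (String × String)) (all_taxons : List String) (out : List (String × List String)) : Decidable (Spec_detect_taxon_species taxon_named_species all_taxons out) := by unfold Spec_detect_taxon_species; infer_instance

-- ===== CLAIM (what is proved, stated in full; the proofs are below) =====
def Claim_equal_detect_taxon_species : Prop := ∀ (taxon_named_species : List (String × String)) (all_taxons : List String), Dom_detect_taxon_species taxon_named_species all_taxons → Pre_detect_taxon_species taxon_named_species all_taxons → Spec_detect_taxon_species taxon_named_species all_taxons (detect_taxon_species taxon_named_species all_taxons)

-- ===== LEMMAS AND PROOFS =====

-- named copies of the two ports' loop bodies, for the proofs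
def pvStepA (tns : List (String × String)) (d : PySem.Dict String (List String)) (kv : String × String) : PySem.Dict String (List String) :=
  let taxon := pvTaxonOf kv.1
  let v := (PySem.Dict.mk tns).getD kv.1 ""
  if d.contains taxon = false then d.insert taxon [v]
  else d.insert taxon (d.getD taxon [] ++ [v])

def pvStep2 (d : PySem.Dict String (List String)) (t : String) : PySem.Dict String (List String) :=
  if d.contains t = false then d.insert t [] else d

def pvStepB (st : PySem.Set String × List String) (t : String) : PySem.Set String × List String :=
  if PySem.Set.contains st.1 t then st else (PySem.Set.add st.1 t, st.2 ++ [t])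

def pvVals (tns : List (String × String)) (t : String) : List String :=
  (tns.filter (fun kv => pvTaxonOf kv.1 == t)).map Prod.snd

lemma pvA_eq (tns : List (String × String)) (ats : List String) :
    detect_taxon_species tns ats = (ats.foldl pvStep2 (tns.foldl (pvStepA tns) PySem.Dict.empty)).items := rfl

lemma pvB_eq (tns : List (String × String)) (ats : List String) :
    detect_taxon_species_alt tns ats =
      (ats.foldl pvStepB (tns.foldl (fun st kv => pvStepB st (pvTaxonOf kv.1)) (PySem.Set.empty, []))).2.map
        (fun t => (t, pvVals tns t)) := rfl

-- A's step equals a modify-append step once the looked-up value is the pair's own value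
lemma pvStepA_eq_modify (tns : List (String × String)) (d : PySem.Dict String (List String))
    (kv : String × String) (hv : (PySem.Dict.mk tns).getD kv.1 "" = kv.2) :
    pvStepA tns d kv = d.modify (pvTaxonOf kv.1) [] (· ++ [kv.2]) := by
  unfold pvStepA
  by_cases h : d.contains (pvTaxonOf kv.1)
  · simp [PySem.Dict.modify, h, hv]
  · have h' : d.contains (pvTaxonOf kv.1) = false := by simpa using h
    simp [PySem.Dict.modify, h', hv, PySem.Dict.getD_of_not_contains d _ h']

-- keys of the second loop: each step is Set.add on the key list
lemma pvStep2_keys (d : PySem.Dict String (List String)) (t : String) :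
    (pvStep2 d t).keys = PySem.Set.add d.keys t := by
  unfold pvStep2 PySem.Set.add
  by_cases h : t ∈ d.keys
  · have h1 : d.contains t = true := (PySem.Dict.contains_iff_mem_keys d t).mpr h
    simp [h1, h]
  · have h1 : d.contains t = false := by
      simpa using (fun hc => h ((PySem.Dict.contains_iff_mem_keys d t).mp hc))
    simp [h1, h, PySem.Dict.keys_insert_of_not_contains d _ h1]

lemma pvStep2_fold_keys (ts : List String) (d : PySem.Dict String (List String)) :
    (ts.foldl pvStep2 d).keys = PySem.Set.update d.keys ts := by
  induction ts generalizing d with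
  | nil => simp [PySem.Set.update]
  | cons t ts ih =>
      simp only [List.foldl_cons, ih, pvStep2_keys]
      rfl

lemma pvStep2_fold_getD_mem (ts : List String) (d : PySem.Dict String (List String)) (t : String)
    (h : d.contains t = true) :
    (ts.foldl pvStep2 d).getD t [] = d.getD t [] := by
  induction ts generalizing d with
  | nil => rfl
  | cons u ts ih =>
      simp only [List.foldl_cons]
      have hc : (pvStep2 d u).contains t = true := by
        unfold pvStep2; split
        · simpa [PySem.Dict.contains_insert] using Or.inr h
        · exact h
      rw [ih _ hc]
      unfold pvStep2; split
      · rename_i hu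
        have : t ≠ u := fun e => by simp [e, hu] at h
        rw [PySem.Dict.getD_insert]; simp [this]
      · rfl

lemma pvStep2_fold_getD_new (ts : List String) (d : PySem.Dict String (List String)) (t : String)
    (h : d.getD t [] = []) :
    (ts.foldl pvStep2 d).getD t [] = [] := by
  induction ts generalizing d with
  | nil => exact h
  | cons u ts ih =>
      simp only [List.foldl_cons]
      apply ih
      unfold pvStep2; split
      · rw [PySem.Dict.getD_insert]; split <;> simp [h]
      · exact h

-- B's order loop, started with equal components, is Set.update on both
lemma pvStepB_fold (ts : List String) (s : PySem.Set String) :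
    ts.foldl pvStepB (s, s) = (PySem.Set.update s ts, PySem.Set.update s ts) := by
  induction ts generalizing s with
  | nil => simp [PySem.Set.update]
  | cons t ts ih =>
      simp only [List.foldl_cons]
      have : pvStepB (s, s) t = (PySem.Set.add s t, PySem.Set.add s t) := by
        unfold pvStepB PySem.Set.add
        by_cases h : t ∈ s <;> simp [PySem.Set.contains, h]
      rw [this, ih]
      rfl

-- ===== VERDICT (by name: the statement is the Claim_ definition above) =====
theorem detect_taxon_species_spec : Claim_equal_detect_taxon_species := by
  intro tns ats _ hpre
  unfold Spec_detect_taxon_species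
  rw [pvA_eq, pvB_eq]
  -- the looked-up value of a pair of tns is its own second component (keys are nodup)
  have hval : ∀ kv ∈ tns, (PySem.Dict.mk tns).getD kv.1 "" = kv.2 := by
    intro kv hkv
    exact PySem.Dict.getD_of_mem_items (PySem.Dict.mk tns) (by simpa using hkv)
      (by simpa [PySem.Dict.keys] using hpre) ""
  -- A's first loop as a modify-append fold over (taxon, value) pairs
  have h1 : tns.foldl (pvStepA tns) PySem.Dict.empty
      = (tns.map (fun kv => (pvTaxonOf kv.1, kv.2))).foldl
          (fun d p => d.modify p.1 [] (· ++ [p.2])) PySem.Dict.empty := by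
    rw [List.foldl_map]
    exact PySem.List.foldl_congr_mem _ _ _ _ (fun acc kv hkv => pvStepA_eq_modify tns acc kv (hval kv hkv))
  set ks : List String := tns.map (fun kv => pvTaxonOf kv.1) with hks
  set d1 := (tns.map (fun kv => (pvTaxonOf kv.1, kv.2))).foldl
      (fun d p => d.modify p.1 [] (· ++ [p.2])) PySem.Dict.empty with hd1
  have hkeys1 : d1.keys = PySem.Set.ofList ks := by
    have h := PySem.Dict.keys_foldl_modify_key (tns.map (fun kv => (pvTaxonOf kv.1, kv.2)))
      Prod.fst [] (fun _ p v => v ++ [p.2]) PySem.Dict.empty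
    simpa [hd1, hks, List.map_map, Function.comp, PySem.Set.update_nil_left] using h
  have hget1 : ∀ c, d1.getD c [] = pvVals tns c := by
    intro c
    rw [hd1, PySem.Dict.getD_foldl_modify_append]
    simp [pvVals, List.filter_map, List.map_map, Function.comp_def]
  -- B's order list is Set.ofList ks, then Set.update with all_taxons
  have hB1 : tns.foldl (fun st kv => pvStepB st (pvTaxonOf kv.1)) (PySem.Set.empty, ([] : List String))
      = (PySem.Set.ofList ks, PySem.Set.ofList ks) := by
    have h := pvStepB_fold ks []
    rw [hks, List.foldl_map] at h
    simpa [PySem.Set.empty, PySem.Set.update_nil_left, hks] using h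
  rw [hB1, pvStepB_fold ats (PySem.Set.ofList ks)]
  set O : List String := PySem.Set.update (PySem.Set.ofList ks) ats with hO
  -- A's final dict: keys are O, values are the grouped lists
  have hkeys2 : (ats.foldl pvStep2 (tns.foldl (pvStepA tns) PySem.Dict.empty)).keys = O := by
    rw [h1, pvStep2_fold_keys, hkeys1]
  have hnodupO : O.Nodup := by
    rw [hO]; exact PySem.Set.nodup_update _ _ (PySem.Set.nodup_ofList _)
  rw [PySem.Dict.items_eq_map_keys _ (by rw [hkeys2]; exact hnodupO) [], hkeys2]
  apply List.map_congr_left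
  intro t htO
  have hd2getD : (ats.foldl pvStep2 (tns.foldl (pvStepA tns) PySem.Dict.empty)).getD t []
      = pvVals tns t := by
    rw [h1]
    by_cases hc : d1.contains t = true
    · rw [pvStep2_fold_getD_mem ats d1 t hc, hget1]
    · have hc' : d1.contains t = false := by simpa using hc
      rw [pvStep2_fold_getD_new ats d1 t (PySem.Dict.getD_of_not_contains d1 [] hc')]
      have ht : t ∉ ks := by
        intro hmem
        have hk : t ∈ d1.keys := by rw [hkeys1]; exact (PySem.Set.mem_ofList _ t).mpr hmem
        exact absurd ((PySem.Dict.contains_iff_mem_keys d1 t).mpr hk) (by simp [hc'])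
      have hfil : tns.filter (fun kv => pvTaxonOf kv.1 == t) = [] := by
        refine List.filter_eq_nil_iff.mpr (fun kv hkv => ?_)
        simp only [beq_iff_eq]
        intro e
        exact ht (by rw [hks]; exact List.mem_map.mpr ⟨kv, hkv, e⟩)
      simp [pvVals, hfil]
  rw [hd2getD]
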